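-- pv_equiv track=rewrite | github.com/Vanchnav/blom_scheme | blom/views.py | participantsnumber
-- ===== SOURCE A (Python) =====
-- def participantsnumber(lst, m):
--     K = []
--     k = 1
--     for i in range(0, m):
--         K.append(2 + i)
--     while K[m - 1] != 4 and k < 15:  # int(len(compromat)) and k<15:
--         k = k + 1
--         r = K[0] + 1
--         K.pop(0)
--         K.insert(0, r)
--         for i in range(1, m):
--             r = K[i - 1] + K[i]
--             K.pop(i)
--             K.insert(i, r)
--     return k
-- ===== SOURCE B (Python) =====
-- def participantsnumber(lst, m):
--     # k depends only on m: the loop stops immediately when m == 3 (K[2] == 4),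
--     # reaches 4 after two increments when m == 1, and otherwise the last entry
--     # of K only grows past 4, so k runs to the cap 15.
--     if m == 1:
--         return 3
--     if m == 3:
--         return 1
--     return 15
-- ===== Notes on version B (the rewrite author's own statement) =====
-- stated objective: faster
-- what changed: Replaced the simulation of the Blom counter loop (building a length-m list and repeatedly rewriting it up to 14 times) by the closed-form answer, which depends only on m: 3 for m=1, 1 for m=3, 15 otherwise.
import Mathlib
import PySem

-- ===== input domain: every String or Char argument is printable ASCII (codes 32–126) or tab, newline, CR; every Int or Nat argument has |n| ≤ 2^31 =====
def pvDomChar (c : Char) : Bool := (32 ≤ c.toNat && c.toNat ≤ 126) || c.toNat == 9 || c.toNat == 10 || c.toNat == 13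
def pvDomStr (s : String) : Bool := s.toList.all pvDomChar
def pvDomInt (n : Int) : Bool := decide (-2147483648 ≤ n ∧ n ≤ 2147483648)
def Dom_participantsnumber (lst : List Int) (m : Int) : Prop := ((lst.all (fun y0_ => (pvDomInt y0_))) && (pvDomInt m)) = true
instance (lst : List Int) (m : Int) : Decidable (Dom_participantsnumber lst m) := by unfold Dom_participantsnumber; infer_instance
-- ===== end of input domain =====

-- ===== PORT A =====
-- B differs in structure: A simulates the loop, B is a closed-form lookup on m.
-- Inner for-loop body: r = K[i-1] + K[i]; K.pop(i); K.insert(i, r)  (rewrites index i in place)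
def pnInner (K : List Int) (i : Int) : List Int :=
  let r := PySem.List.pyGetD K (i - 1) 0 + PySem.List.pyGetD K i 0
  let K' := ((PySem.List.pop? K i).map (fun p => p.2)).getD K
  PySem.List.insert K' i r

-- one pass of the while-loop body: r = K[0] + 1; K.pop(0); K.insert(0, r); then the inner for-loop
def pnStep (m : Int) (K : List Int) : List Int :=
  let r := PySem.List.pyGetD K 0 0 + 1
  let K1 := ((PySem.List.pop? K 0).map (fun p => p.2)).getD K   -- K.pop(0); in range whenever Pre_ holds
  let K2 := PySem.List.insert K1 0 r
  (PySem.List.pyRange 1 m 1).foldl pnInner K2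

-- the while loop; fuel 14 is exact: k starts at 1, grows by 1 each pass, and the guard needs k < 15
def pnWhile (m : Int) : Nat → List Int → Int → Int
  | 0, _, k => k
  | fuel + 1, K, k =>
    if PySem.List.pyGetD K (m - 1) 0 ≠ 4 ∧ k < 15 then
      pnWhile m fuel (pnStep m K) (k + 1)
    else k

def participantsnumber (lst : List Int) (m : Int) : Int :=
  let K := (PySem.List.pyRange 0 m 1).foldl (fun K i => K ++ [2 + i]) []
  pnWhile m 14 K 1

-- ===== PORT B =====
def participantsnumber_alt (lst : List Int) (m : Int) : Int :=
  if m = 1 then 3 else if m = 3 then 1 else 15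

-- ===== PRECONDITION & SPEC =====
-- A raises IndexError for m <= 0 (K is empty, K[m-1] fails); exactly those inputs are excluded.
def Pre_participantsnumber (lst : List Int) (m : Int) : Prop := 1 ≤ m
instance (lst : List Int) (m : Int) : Decidable (Pre_participantsnumber lst m) := by unfold Pre_participantsnumber; infer_instance
def pvWitness_participantsnumber : List Int × Int := ([], 4)
def Spec_participantsnumber (lst : List Int) (m : Int) (out : Int) : Prop := out = participantsnumber_alt lst m
instance (lst : List Int) (m : Int) (out : Int) : Decidable (Spec_participantsnumber lst m out) := by unfold Spec_participantsnumber; infer_instance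

-- ===== CLAIM (what is proved, stated in full; the proofs are below) =====
def Claim_equal_participantsnumber : Prop := ∀ (lst : List Int) (m : Int), Dom_participantsnumber lst m → Pre_participantsnumber lst m → Spec_participantsnumber lst m (participantsnumber lst m)

-- ===== LEMMAS AND PROOFS =====

-- pop?(i) followed by insert(i, v) rewrites index i in place
theorem pv_popins (K : List Int) (i : Nat) (h : i < K.length) (v : Int) :
    PySem.List.insert (((PySem.List.pop? K (i : Int)).map (fun p => p.2)).getD K) (i : Int) v
      = K.set i v := by
  rw [PySem.List.pop?_natCast K i h]
  simp only [Option.map_some, Option.getD_some]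
  rw [PySem.List.insert_natCast _ i v (by rw [List.length_eraseIdx_of_lt h]; omega)]
  rw [List.eraseIdx_eq_take_drop_succ]
  rw [List.take_append_of_le_length (by simp; omega), List.take_take, min_self]
  rw [List.drop_append_of_le_length (by simp; omega)]
  rw [List.drop_take]
  have hz : i - i = 0 := by omega
  rw [hz, List.take_zero, List.nil_append]
  rw [List.set_eq_take_append_cons_drop, if_pos h]

-- the inner for-loop body at index i = 1 + k, reduced to List.set
theorem pv_body_eq (K : List Int) (k : Nat) (h : k + 1 < K.length) :
    pnInner K (1 + (k : Int)) = K.set (k + 1) (K.getD k 0 + K.getD (k + 1) 0) := by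
  unfold pnInner
  have h1 : (1 : Int) + (k : Int) = ((k + 1 : Nat) : Int) := by push_cast; ring
  simp only [h1]
  have h2 : ((k + 1 : Nat) : Int) - 1 = ((k : Nat) : Int) := by push_cast; ring
  simp only [h2, PySem.List.pyGetD_natCast]
  exact pv_popins K (k + 1) h _

-- invariant of the inner for-loop over range(1, m): length preserved, all entries stay ≥ 2,
-- entries beyond the processed prefix unchanged
theorem pv_fold_inv (N : Nat) (K : List Int) (hlen : N + 1 ≤ K.length) (hall : ∀ x ∈ K, 2 ≤ x) :
    ((List.range N).foldl (fun (K : List Int) (k : Nat) =>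
        K.set (k + 1) (K.getD k 0 + K.getD (k + 1) 0)) K).length = K.length ∧
    (∀ x ∈ (List.range N).foldl (fun (K : List Int) (k : Nat) =>
        K.set (k + 1) (K.getD k 0 + K.getD (k + 1) 0)) K, 2 ≤ x) ∧
    ∀ j, N < j → ((List.range N).foldl (fun (K : List Int) (k : Nat) =>
        K.set (k + 1) (K.getD k 0 + K.getD (k + 1) 0)) K).getD j 0 = K.getD j 0 := by
  induction N with
  | zero => exact ⟨rfl, hall, fun j _ => rfl⟩
  | succ N ih =>
    obtain ⟨hl, ha, hu⟩ := ih (by omega)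
    simp only [List.range_succ, List.foldl_append, List.foldl_cons, List.foldl_nil]
    set R := (List.range N).foldl (fun (K : List Int) (k : Nat) =>
        K.set (k + 1) (K.getD k 0 + K.getD (k + 1) 0)) K with hR
    have hNl : N < R.length := by omega
    have hN1l : N + 1 < R.length := by omega
    have hv : 2 ≤ R.getD N 0 + R.getD (N + 1) 0 := by
      have m1 : R.getD N 0 ∈ R := by
        rw [List.getD_eq_getElem R 0 hNl]; exact List.getElem_mem _
      have m2 : R.getD (N + 1) 0 ∈ R := by
        rw [List.getD_eq_getElem R 0 hN1l]; exact List.getElem_mem _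
      have := ha _ m1; have := ha _ m2; omega
    refine ⟨by simpa using hl, ?_, ?_⟩
    · intro x hx
      rcases List.mem_or_eq_of_mem_set hx with hxx | hxx
      · exact ha x hxx
      · omega
    · intro j hj
      rw [List.getD_eq_getElem?_getD, List.getElem?_set_ne (by omega),
          ← List.getD_eq_getElem?_getD]
      exact hu j (by omega)

-- the pnInner fold coincides with the clean List.set fold while indices stay in range
theorem pv_fold_eq (n : Nat) (N : Nat) (L : List Int) (hL : L.length = n)
    (hLa : ∀ x ∈ L, 2 ≤ x) (hNn : N + 1 ≤ n) :
    (List.range N).foldl (fun (K : List Int) (k : Nat) => pnInner K (1 + (k : Int))) L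
      = (List.range N).foldl (fun (K : List Int) (k : Nat) =>
          K.set (k + 1) (K.getD k 0 + K.getD (k + 1) 0)) L := by
  induction N with
  | zero => rfl
  | succ N ihN =>
    simp only [List.range_succ, List.foldl_append, List.foldl_cons, List.foldl_nil]
    rw [ihN (by omega)]
    obtain ⟨hl, _, _⟩ := pv_fold_inv N L (by omega) hLa
    exact pv_body_eq _ N (by omega)

-- one pass of the while-loop body: length kept, entries stay ≥ 2, the last entry grows by ≥ 2
theorem pv_step_spec (m : Int) (K : List Int) (n : Nat) (hn : 2 ≤ n)
    (hm : m = (n : Int)) (hlen : K.length = n) (hall : ∀ x ∈ K, 2 ≤ x) :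
    (pnStep m K).length = n ∧ (∀ x ∈ pnStep m K, 2 ≤ x) ∧
      K.getD (n - 1) 0 + 2 ≤ (pnStep m K).getD (n - 1) 0 := by
  obtain ⟨h, t, rfl⟩ : ∃ h t, K = h :: t := by
    cases K with
    | nil => simp at hlen; omega
    | cons h t => exact ⟨h, t, rfl⟩
  have h2 : 2 ≤ h := hall h (by simp)
  unfold pnStep
  simp only [PySem.List.pyGetD_zero_cons, PySem.List.pop?_zero_cons, Option.map_some,
    Option.getD_some, PySem.List.insert_zero]
  have hK2len : ((h + 1) :: t).length = n := by simpa using hlen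
  have hK2all : ∀ x ∈ (h + 1) :: t, 2 ≤ x := by
    intro x hx
    rcases List.mem_cons.mp hx with rfl | hx
    · omega
    · exact hall x (by simp [hx])
  -- rewrite the pyRange fold into the clean Nat-indexed fold
  rw [PySem.List.pyRange_one, List.foldl_map]
  have hn1 : (m - 1).toNat = n - 1 := by omega
  rw [hn1, pv_fold_eq n (n - 1) _ hK2len hK2all (by omega)]
  -- split off the last step of the fold
  obtain ⟨N, hN⟩ : ∃ N, n - 1 = N + 1 := ⟨n - 2, by omega⟩
  rw [hN, List.range_succ, List.foldl_append, List.foldl_cons, List.foldl_nil]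
  obtain ⟨hl, ha, hu⟩ := pv_fold_inv N ((h + 1) :: t) (by omega) hK2all
  set R := (List.range N).foldl (fun (K : List Int) (k : Nat) =>
      K.set (k + 1) (K.getD k 0 + K.getD (k + 1) 0)) ((h + 1) :: t) with hRdef
  have hRlen : R.length = n := by omega
  have hNn : N + 1 < R.length := by omega
  have hvN : 2 ≤ R.getD N 0 := by
    have hm1 : R.getD N 0 ∈ R := by
      rw [List.getD_eq_getElem R 0 (by omega)]; exact List.getElem_mem _
    exact ha _ hm1
  have hlast : R.getD (N + 1) 0 = (h :: t).getD (N + 1) 0 := by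
    rw [hu (N + 1) (by omega)]
    simp
  have hRn : R.length = n := by rw [hl]; exact hK2len
  refine ⟨by simp only [List.length_set]; exact hRn, ?_, ?_⟩
  · intro x hx
    rcases List.mem_or_eq_of_mem_set hx with hxx | hxx
    · exact ha x hxx
    · have hm2 : R.getD (N + 1) 0 ∈ R := by
        rw [List.getD_eq_getElem R 0 hNn]; exact List.getElem_mem _
      have := ha _ hm2; omega
  · have hgoal : (R.set (N + 1) (R.getD N 0 + R.getD (N + 1) 0)).getD (N + 1) 0
        = R.getD N 0 + R.getD (N + 1) 0 := by
      rw [List.getD_eq_getElem?_getD, List.getElem?_set_self (by omega), Option.getD_some]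
    rw [hgoal, hlast]
    omega

-- the while loop runs to the cap when the last entry is already past 4
theorem pv_while_15 (m : Int) (n : Nat) (hm : m = (n : Int)) (hn : 2 ≤ n) :
    ∀ (fuel : Nat) (K : List Int) (k : Int), k = 15 - (fuel : Int) → K.length = n →
      (∀ x ∈ K, 2 ≤ x) → 4 < K.getD (n - 1) 0 → pnWhile m fuel K k = 15 := by
  intro fuel
  induction fuel with
  | zero => intro K k hk _ _ _; rw [pnWhile]; omega
  | succ f ih =>
    intro K k hk hlen hall hlast
    have hidx : m - 1 = ((n - 1 : Nat) : Int) := by omega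
    rw [pnWhile, if_pos]
    · have hstep := pv_step_spec m K n hn hm hlen hall
      exact ih (pnStep m K) (k + 1) (by push_cast at hk ⊢; omega) hstep.1 hstep.2.1 (by omega)
    · constructor
      · rw [hidx, PySem.List.pyGetD_natCast]
        omega
      · push_cast at hk; omega

-- the initial list is [2, 3, …, m+1]: length m, all entries ≥ 2, last entry m + 1
theorem pv_init (m : Int) (hm : 1 ≤ m) :
    ((PySem.List.pyRange 0 m 1).foldl (fun K i => K ++ [2 + i]) ([] : List Int)).length = m.toNat ∧
    (∀ x ∈ (PySem.List.pyRange 0 m 1).foldl (fun K i => K ++ [2 + i]) ([] : List Int), 2 ≤ x) ∧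
    ((PySem.List.pyRange 0 m 1).foldl (fun K i => K ++ [2 + i]) ([] : List Int)).getD
        (m.toNat - 1) 0 = m + 1 := by
  rw [PySem.List.foldl_append_singleton_eq_map]
  simp only [List.nil_append]
  refine ⟨by simp [PySem.List.length_pyRange_one], ?_, ?_⟩
  · intro x hx
    simp only [List.mem_map] at hx
    obtain ⟨i, hi, rfl⟩ := hx
    have := (PySem.List.mem_pyRange_one).mp hi
    omega
  · have hlt : m.toNat - 1 < (List.map (fun i => 2 + i) (PySem.List.pyRange 0 m 1)).length := by
      simp [PySem.List.length_pyRange_one]; omega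
    rw [List.getD_eq_getElem _ 0 hlt, List.getElem_map, PySem.List.getElem_pyRange_one]
    omega

-- ===== VERDICT (by name: the statement is the Claim_ definition above) =====
theorem participantsnumber_spec : Claim_equal_participantsnumber := by
  intro lst m _ hpre
  unfold Spec_participantsnumber Pre_participantsnumber at *
  by_cases h1 : m = 1
  · subst h1; rfl
  by_cases h2 : m = 2
  · subst h2; rfl
  by_cases h3 : m = 3
  · subst h3; rfl
  -- m ≥ 4: A's counter runs to the cap 15, which is B's default branch
  have hm4 : 4 ≤ m := by omega
  have halt : participantsnumber_alt lst m = 15 := by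
    unfold participantsnumber_alt; rw [if_neg h1, if_neg h3]
  rw [halt]
  obtain ⟨hlen, hall, hlast⟩ := pv_init m (by omega)
  exact pv_while_15 m m.toNat (by omega) (by omega) 14 _ 1 (by norm_num) hlen hall (by omega)
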